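-- pv_equiv track=rewrite | github.com/james5635/GeekForGeek-Data-Structure-and-Algorithm | sorting/medium/sort_0s_1s_2s/solution.py | verify_sorted_012
-- ===== SOURCE A (Python) =====
-- from typing import List
--
-- def verify_sorted_012(arr: List[int]) -> bool:
--     """
--     Verify if array is sorted correctly (all 0s, then 1s, then 2s).
--
--     Args:
--         arr: List to verify
--
--     Returns:
--         True if correctly sorted
--     """
--     seen_one = False
--     seen_two = False
--
--     for num in arr:
--         if num == 0:
--             if seen_one or seen_two:
--                 return False
--         elif num == 1:
--             if seen_two:
--                 return False
--             seen_one = True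
--         elif num == 2:
--             seen_two = True
--         else:
--             return False
--
--     return True
-- ===== SOURCE B (Python) =====
-- from typing import List
--
-- def verify_sorted_012(arr: List[int]) -> bool:
--     """Verify array is all 0s, then 1s, then 2s: domain check + non-decreasing."""
--     return all(x in (0, 1, 2) for x in arr) and all(a <= b for a, b in zip(arr, arr[1:]))
-- ===== Notes on version B (the rewrite author's own statement) =====
-- stated objective: simpler
-- what changed: Replaced A's seen_one/seen_two flag state machine with a stateless check: every element is in {0,1,2} and adjacent pairs are non-decreasing.
import Mathlib
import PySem

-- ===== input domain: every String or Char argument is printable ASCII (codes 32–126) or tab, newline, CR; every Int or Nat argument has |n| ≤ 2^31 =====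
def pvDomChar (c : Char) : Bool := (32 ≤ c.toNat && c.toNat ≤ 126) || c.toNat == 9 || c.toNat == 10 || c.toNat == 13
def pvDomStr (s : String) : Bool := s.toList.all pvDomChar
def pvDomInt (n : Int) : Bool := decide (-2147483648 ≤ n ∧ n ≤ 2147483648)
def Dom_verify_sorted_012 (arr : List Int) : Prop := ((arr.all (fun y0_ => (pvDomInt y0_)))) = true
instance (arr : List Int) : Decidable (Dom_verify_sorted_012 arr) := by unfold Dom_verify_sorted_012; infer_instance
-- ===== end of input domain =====

-- B replaces A's seen_one/seen_two flag loop by a stateless check: membership in {0,1,2} plus adjacent non-decreasing.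

-- ===== PORT A =====
-- the for-loop with early returns, carried as structural recursion over (seen_one, seen_two)
def verifyGo : List Int → Bool → Bool → Bool
  | [], _, _ => true
  | num :: rest, seen_one, seen_two =>
    if num = 0 then
      if seen_one || seen_two then false else verifyGo rest seen_one seen_two
    else if num = 1 then
      if seen_two then false else verifyGo rest true seen_two
    else if num = 2 then
      verifyGo rest seen_one true
    else false

def verify_sorted_012 (arr : List Int) : Bool := verifyGo arr false false

-- ===== PORT B =====
-- all(x in (0,1,2) for x in arr) and all(a <= b for a, b in zip(arr, arr[1:]))
def verify_sorted_012_alt (arr : List Int) : Bool :=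
  (arr.all fun x => x = 0 || x = 1 || x = 2) &&
    ((arr.zip (PySem.List.slice arr (some 1) none)).all fun p => p.1 ≤ p.2)

-- ===== PRECONDITION & SPEC =====
def Spec_verify_sorted_012 (arr : List Int) (out : Bool) : Prop := out = verify_sorted_012_alt arr
instance (arr : List Int) (out : Bool) : Decidable (Spec_verify_sorted_012 arr out) := by unfold Spec_verify_sorted_012; infer_instance

-- ===== CLAIM (what is proved, stated in full; the proofs are below) =====
def Claim_equal_verify_sorted_012 : Prop := ∀ (arr : List Int), Dom_verify_sorted_012 arr → Spec_verify_sorted_012 arr (verify_sorted_012 arr)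

-- ===== LEMMAS AND PROOFS =====

def adjChk : List Int → Bool
  | [] => true
  | [_] => true
  | a :: b :: t => (decide (a ≤ b)) && adjChk (b :: t)

-- the zip-with-tail pass of B's port is the adjacent-pairs recursion
lemma zip_tail_eq_adjChk (arr : List Int) :
    ((arr.zip (PySem.List.slice arr (some 1) none)).all fun p => decide (p.1 ≤ p.2)) = adjChk arr := by
  rw [PySem.List.slice_from_one]
  induction arr with
  | nil => rfl
  | cons a t ih =>
    cases t with
    | nil => rfl
    | cons b u =>
      simp only [List.tail_cons] at ih
      simp only [adjChk, List.tail_cons, List.zip_cons_cons, List.all_cons, ih]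

def headGE (lo : Int) : List Int → Bool
  | [] => true
  | a :: _ => decide (lo ≤ a)

def minAllowed (s1 s2 : Bool) : Int := if s2 then 2 else if s1 then 1 else 0

lemma verifyGo_eq (arr : List Int) (s1 s2 : Bool) :
    verifyGo arr s1 s2 =
      ((arr.all fun x => x = 0 || x = 1 || x = 2) && adjChk arr && headGE (minAllowed s1 s2) arr) := by
  induction arr generalizing s1 s2 with
  | nil => simp [verifyGo, adjChk, headGE]
  | cons a t ih =>
    have hadj : adjChk (a :: t) = (headGE a t && adjChk t) := by
      cases t <;> simp [adjChk, headGE]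
    by_cases h0 : a = 0
    · subst h0
      cases s1 <;> cases s2 <;>
        simp [verifyGo, ih, hadj, minAllowed, headGE] <;> simp [Bool.and_comm, Bool.and_assoc, Bool.and_left_comm]
    · by_cases h1 : a = 1
      · subst h1
        cases s1 <;> cases s2 <;>
          simp [verifyGo, ih, hadj, minAllowed, headGE] <;> simp [Bool.and_comm, Bool.and_assoc, Bool.and_left_comm]
      · by_cases h2 : a = 2
        · subst h2
          cases s1 <;> cases s2 <;>
            simp [verifyGo, ih, hadj, minAllowed, headGE] <;> simp [Bool.and_comm, Bool.and_assoc, Bool.and_left_comm]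
        · simp [verifyGo, h0, h1, h2, hadj, headGE]

-- ===== VERDICT (by name: the statement is the Claim_ definition above) =====
theorem verify_sorted_012_spec : Claim_equal_verify_sorted_012 := by
  intro arr _
  unfold Spec_verify_sorted_012 verify_sorted_012 verify_sorted_012_alt
  rw [zip_tail_eq_adjChk, verifyGo_eq]
  cases arr with
  | nil => rfl
  | cons a t =>
    by_cases h : (0 : Int) ≤ a <;> simp [headGE, minAllowed, h] <;> omega
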